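-- pv_equiv track=rewrite | github.com/dd-n-kk/dl-lab | src/dl_lab/metrics.py | _make_names
-- ===== SOURCE A (Python) =====
-- from collections.abc import Callable, Iterable
--
-- def _make_names(
--     n_classes: int, prefix: str = "", labels: Iterable[str] | None = None
-- ) -> tuple[str, ...]:
--     if labels:
--         labels_ = tuple(labels)
--         if len(labels_) != n_classes:
--             raise ValueError(f"Got {len(labels_)} labels for {n_classes} classes.")
--     else:
--         labels_ = tuple(range(n_classes))
--
--     names = (
--         "ACC",
--         *(f"F1_{label}" for label in labels_),
--         *(f"TPR_{label}" for label in labels_),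
--         *(f"TNR_{label}" for label in labels_),
--         *(f"PPV_{label}" for label in labels_),
--         *(f"NPV_{label}" for label in labels_),
--     )
--
--     return tuple(f"{prefix}_{name}" for name in names) if prefix else names
-- ===== SOURCE B (Python) =====
-- def _make_names(n_classes, prefix="", labels=None):
--     if labels:
--         labels_ = tuple(labels)
--         if len(labels_) != n_classes:
--             raise ValueError(f"Got {len(labels_)} labels for {n_classes} classes.")
--     else:
--         labels_ = tuple(range(n_classes))
--     n = len(labels_)
--     codes = ("F1", "TPR", "TNR", "PPV", "NPV")
--     pfx = f"{prefix}_" if prefix else ""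
--     return tuple(
--         pfx + ("ACC" if i == 0 else f"{codes[(i - 1) // n]}_{labels_[(i - 1) % n]}")
--         for i in range(1 + 5 * n)
--     )
-- ===== Notes on version B (the rewrite author's own statement) =====
-- stated objective: alternative
-- what changed: B computes the i-th name directly by index arithmetic -- i//n selects the metric code from a table and i%n the label -- in one comprehension over range(1+5n) with the prefix applied inline, instead of A's five parallel per-code generator passes spliced into a tuple followed by a separate prefixing pass.
import Mathlib
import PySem

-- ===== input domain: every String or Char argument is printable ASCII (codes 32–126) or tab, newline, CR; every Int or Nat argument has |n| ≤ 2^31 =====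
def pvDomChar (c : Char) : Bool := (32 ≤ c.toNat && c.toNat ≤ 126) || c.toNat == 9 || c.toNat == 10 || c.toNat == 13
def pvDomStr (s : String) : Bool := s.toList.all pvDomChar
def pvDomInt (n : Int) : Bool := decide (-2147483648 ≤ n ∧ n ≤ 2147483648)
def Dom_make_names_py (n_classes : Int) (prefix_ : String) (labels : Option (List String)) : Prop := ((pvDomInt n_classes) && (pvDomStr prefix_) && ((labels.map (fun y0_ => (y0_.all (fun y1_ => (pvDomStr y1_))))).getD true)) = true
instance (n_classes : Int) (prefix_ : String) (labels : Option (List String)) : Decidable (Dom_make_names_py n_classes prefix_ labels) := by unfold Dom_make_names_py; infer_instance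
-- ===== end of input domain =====

-- B builds the i-th name directly by index arithmetic ((i-1)//n picks the metric code, (i-1)%n the
-- label) in one pass over range(1+5n) with the prefix applied inline, instead of A's five spliced
-- per-code generator passes followed by a separate prefixing pass (same cost, different algorithm).

-- ===== PORT A =====
-- label resolution: `if labels: … else tuple(range(n_classes))` (the ValueError case is excluded by Pre_)
def pvLabelsA (n_classes : Int) (labels : Option (List String)) : List String :=
  match labels with
  | some l => if l ≠ [] then l else (PySem.List.pyRange 0 n_classes 1).map PySem.Int.toStr
  | none => (PySem.List.pyRange 0 n_classes 1).map PySem.Int.toStr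

def make_names_py (n_classes : Int) (prefix_ : String) (labels : Option (List String)) : List String :=
  let labels_ := pvLabelsA n_classes labels
  let names := ["ACC"]
      ++ labels_.map (fun l => "F1_" ++ l)
      ++ labels_.map (fun l => "TPR_" ++ l)
      ++ labels_.map (fun l => "TNR_" ++ l)
      ++ labels_.map (fun l => "PPV_" ++ l)
      ++ labels_.map (fun l => "NPV_" ++ l)
  if prefix_ ≠ "" then names.map (fun nm => prefix_ ++ "_" ++ nm) else names

-- ===== PORT B =====
def pvLabelsB (n_classes : Int) (labels : Option (List String)) : List String :=
  match labels with
  | some l => if l ≠ [] then l else (PySem.List.pyRange 0 n_classes 1).map PySem.Int.toStr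
  | none => (PySem.List.pyRange 0 n_classes 1).map PySem.Int.toStr

def make_names_py_alt (n_classes : Int) (prefix_ : String) (labels : Option (List String)) : List String :=
  let labels_ := pvLabelsB n_classes labels
  let n : Int := labels_.length
  let codes : List String := ["F1", "TPR", "TNR", "PPV", "NPV"]
  let pfx := if prefix_ ≠ "" then prefix_ ++ "_" else ""
  -- the indices (i-1)//n and (i-1)%n are always in range for 1 ≤ i < 1+5n, so `.getD ""`
  -- is never taken: exact port of Python's plain `codes[…]` / `labels_[…]` indexing there
  (PySem.List.pyRange 0 (1 + 5 * n) 1).map (fun i =>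
    pfx ++ (if i == 0 then "ACC"
      else ((PySem.List.pyGet? codes (PySem.Int.floordiv (i - 1) n)).getD "") ++ "_" ++
           ((PySem.List.pyGet? labels_ (PySem.Int.mod (i - 1) n)).getD "")))

-- ===== PRECONDITION & SPEC =====
-- Pre_ excludes exactly the inputs where A raises ValueError: a non-empty labels list whose length differs from n_classes.
def Pre_make_names_py (n_classes : Int) (prefix_ : String) (labels : Option (List String)) : Prop :=
  (labels.all (fun l => l.isEmpty || (l.length : Int) == n_classes)) = true
instance (n_classes : Int) (prefix_ : String) (labels : Option (List String)) : Decidable (Pre_make_names_py n_classes prefix_ labels) := by unfold Pre_make_names_py; infer_instance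

def pvWitness_make_names_py : Int × String × Option (List String) := (2, "va", some ["cat", "dog"])

def Spec_make_names_py (n_classes : Int) (prefix_ : String) (labels : Option (List String)) (out : List String) : Prop := out = make_names_py_alt n_classes prefix_ labels
instance (n_classes : Int) (prefix_ : String) (labels : Option (List String)) (out : List String) : Decidable (Spec_make_names_py n_classes prefix_ labels out) := by unfold Spec_make_names_py; infer_instance

-- ===== CLAIM (what is proved, stated in full; the proofs are below) =====
def Claim_equal_make_names_py : Prop := ∀ (n_classes : Int) (prefix_ : String) (labels : Option (List String)), Dom_make_names_py n_classes prefix_ labels → Pre_make_names_py n_classes prefix_ labels → Spec_make_names_py n_classes prefix_ labels (make_names_py n_classes prefix_ labels)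

-- ===== LEMMAS AND PROOFS =====

lemma pv_map_range_getD (xs : List String) (d : String) :
    (List.range xs.length).map (fun k => xs.getD k d) = xs := by
  apply List.ext_getElem
  · simp
  · intro i h1 h2
    simp [List.getD_eq_getElem?_getD, List.getElem?_eq_getElem h2]

lemma pv_chunks (h : String → String → String) (L : List String) : ∀ (cs : List String),
    (List.range (cs.length * L.length)).map
      (fun k => h (cs.getD (k / L.length) "") (L.getD (k % L.length) "")) =
    cs.flatMap (fun c => L.map (h c)) := by
  intro cs
  induction cs with
  | nil => simp
  | cons c cs ih =>
    by_cases hn : L.length = 0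
    · rcases List.length_eq_zero_iff.mp hn with rfl
      simp only [List.length_nil, Nat.mul_zero, List.range_zero, List.map_nil] at ih ⊢
      simp [← ih]
    · have hpos : 0 < L.length := Nat.pos_of_ne_zero hn
      have hlen : (c :: cs).length * L.length = L.length + cs.length * L.length := by
        simp [Nat.succ_mul, Nat.add_comm]
      rw [hlen, List.range_add, List.map_append, List.map_map, List.flatMap_cons]
      congr 1
      · have h1 : ∀ k ∈ List.range L.length,
            h ((c :: cs).getD (k / L.length) "") (L.getD (k % L.length) "") = (h c) (L.getD k "") := by
          intro k hk
          rw [List.mem_range] at hk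
          rw [Nat.div_eq_of_lt hk, Nat.mod_eq_of_lt hk]
          rfl
        rw [List.map_congr_left h1,
          show (fun a => h c (L.getD a "")) = (h c) ∘ (fun a => L.getD a "") from rfl,
          ← List.map_map, pv_map_range_getD]
      · rw [← ih]
        apply List.map_congr_left
        intro k _
        simp only [Function.comp]
        have hdiv : (L.length + k) / L.length = k / L.length + 1 := by
          rw [Nat.add_comm, Nat.add_div_right _ hpos]
        have hmod : (L.length + k) % L.length = k % L.length := Nat.add_mod_left _ _
        rw [hdiv, hmod]
        rfl

lemma pv_main (L : List String) (pfx : String) :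
    (PySem.List.pyRange 0 (1 + 5 * (L.length : Int)) 1).map (fun i =>
      pfx ++ (if i == 0 then "ACC"
        else ((PySem.List.pyGet? ["F1", "TPR", "TNR", "PPV", "NPV"] (PySem.Int.floordiv (i - 1) (L.length : Int))).getD "") ++ "_" ++
             ((PySem.List.pyGet? L (PySem.Int.mod (i - 1) (L.length : Int))).getD ""))) =
    (["ACC"] ++ L.map (fun l => "F1_" ++ l) ++ L.map (fun l => "TPR_" ++ l)
      ++ L.map (fun l => "TNR_" ++ l) ++ L.map (fun l => "PPV_" ++ l)
      ++ L.map (fun l => "NPV_" ++ l)).map (fun nm => pfx ++ nm) := by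
  have hcast : (1 + 5 * (L.length : Int)) = ((5 * L.length + 1 : Nat) : Int) := by push_cast; ring
  rw [hcast, PySem.List.pyRange_zero_natCast, List.map_map, List.range_succ_eq_map, List.map_cons, List.map_map]
  simp only [List.map_append, List.map_cons, List.map_map, List.cons_append, List.nil_append]
  refine List.cons_eq_cons.mpr ⟨by norm_num, ?_⟩
  have hstep : ∀ k ∈ List.range (5 * L.length),
      (((fun i => pfx ++ (if i == 0 then "ACC"
        else ((PySem.List.pyGet? ["F1", "TPR", "TNR", "PPV", "NPV"] (PySem.Int.floordiv (i - 1) (L.length : Int))).getD "") ++ "_" ++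
             ((PySem.List.pyGet? L (PySem.Int.mod (i - 1) (L.length : Int))).getD ""))) ∘ (fun (k : Nat) => ((k : Nat) : Int))) ∘ Nat.succ) k =
      (fun k => (fun c l => pfx ++ (c ++ "_" ++ l)) ((["F1", "TPR", "TNR", "PPV", "NPV"] : List String).getD (k / L.length) "") (L.getD (k % L.length) "")) k := by
    intro k _
    simp only [Function.comp]
    have h1 : ((Nat.succ k : Nat) : Int) - 1 = ((k : Nat) : Int) := by push_cast; ring
    have h2 : (((Nat.succ k : Nat) : Int) == 0) = false := by
      simp only [beq_eq_false_iff_ne]; omega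
    rw [h1, h2]
    simp only [PySem.Int.floordiv_natCast, PySem.Int.mod_natCast, PySem.List.pyGet?_natCast]
    simp [List.getD_eq_getElem?_getD]
  rw [List.map_congr_left hstep]
  rw [show (5 : Nat) * L.length = (["F1", "TPR", "TNR", "PPV", "NPV"] : List String).length * L.length by simp]
  rw [pv_chunks (fun c l => pfx ++ (c ++ "_" ++ l)) L ["F1", "TPR", "TNR", "PPV", "NPV"]]
  simp [Function.comp_def, List.append_assoc]

-- ===== VERDICT (by name: the statement is the Claim_ definition above) =====
theorem make_names_py_spec : Claim_equal_make_names_py := by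
  intro n_classes prefix_ labels _ _
  show make_names_py n_classes prefix_ labels = make_names_py_alt n_classes prefix_ labels
  have hLB : pvLabelsB n_classes labels = pvLabelsA n_classes labels := rfl
  by_cases hp : prefix_ = ""
  · simp only [make_names_py, make_names_py_alt, hLB, hp, ne_eq, not_true_eq_false,
      if_false]
    rw [pv_main]
    simp [Function.comp_def]
  · simp only [make_names_py, make_names_py_alt, hLB, ne_eq, hp, not_false_eq_true,
      if_true]
    rw [pv_main]
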